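-- pv_equiv track=rewrite | github.com/diogo-h-cost/Fatec | 5_termo/prog_linear/n1/Aula_2/formulas.py | formula_2
-- ===== SOURCE A (Python) =====
-- def formula_2(lin, col):
--     matriz = []
--     for i in range(1, lin + 1):
--         linhas = []
--         for j in range(1, col + 1):
--             if i == j:
--                 form = 2 * i - 3 * j
--             else:
--                 form = 4 * i + 5 * j
--             linhas.append(form)
--         matriz.append(linhas)
--     return matriz
-- ===== SOURCE B (Python) =====
-- def formula_2(lin, col):
--     n = lin if lin > 0 else 0
--     m = col if col > 0 else 0
--     flat = []
--     for k in range(n * m):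
--         i, j = divmod(k, m)
--         flat.append(2 * (i + 1) - 3 * (j + 1) if i == j else 4 * (i + 1) + 5 * (j + 1))
--     return [flat[r * m:(r + 1) * m] for r in range(n)]
-- ===== Notes on version B (the rewrite author's own statement) =====
-- stated objective: alternative
-- what changed: B replaces A's nested row/column loops by one flat pass over range(lin*col) that recovers (i,j) from the linear index with divmod and then reshapes the flat list into rows by slicing.
import Mathlib
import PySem

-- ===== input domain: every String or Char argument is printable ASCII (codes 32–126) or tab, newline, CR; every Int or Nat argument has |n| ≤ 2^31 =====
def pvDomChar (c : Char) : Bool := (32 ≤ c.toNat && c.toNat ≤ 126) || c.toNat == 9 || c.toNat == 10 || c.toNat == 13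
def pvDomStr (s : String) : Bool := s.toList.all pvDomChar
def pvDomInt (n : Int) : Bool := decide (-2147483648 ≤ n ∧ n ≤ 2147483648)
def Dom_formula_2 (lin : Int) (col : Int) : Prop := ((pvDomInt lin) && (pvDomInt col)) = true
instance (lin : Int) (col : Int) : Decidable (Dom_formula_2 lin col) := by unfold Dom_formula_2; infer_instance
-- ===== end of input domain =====

-- B replaces A's nested row/column loops by one flat pass over range(lin*col), recovering
-- (i, j) from the linear index with divmod, then reshapes the flat list into rows by slicing.

-- ===== PORT A =====
def formula_2 (lin : Int) (col : Int) : List (List Int) :=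
  (PySem.List.pyRange 1 (lin + 1) 1).foldl (fun matriz i =>
    matriz ++ [(PySem.List.pyRange 1 (col + 1) 1).foldl (fun linhas j =>
      linhas ++ [if i = j then 2 * i - 3 * j else 4 * i + 5 * j]) []]) []

-- ===== PORT B =====
def formula_2_alt (lin : Int) (col : Int) : List (List Int) :=
  let n : Int := if lin > 0 then lin else 0
  let m : Int := if col > 0 then col else 0
  let flat := (PySem.List.pyRange 0 (n * m) 1).foldl (fun acc k =>
    let i := PySem.Int.floordiv k m
    let j := PySem.Int.mod k m
    acc ++ [if i = j then 2 * (i + 1) - 3 * (j + 1) else 4 * (i + 1) + 5 * (j + 1)]) []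
  (PySem.List.pyRange 0 n 1).map (fun r =>
    PySem.List.slice flat (some (r * m)) (some ((r + 1) * m)))

-- ===== PRECONDITION & SPEC =====
def Spec_formula_2 (lin : Int) (col : Int) (out : List (List Int)) : Prop := out = formula_2_alt lin col
instance (lin : Int) (col : Int) (out : List (List Int)) : Decidable (Spec_formula_2 lin col out) := by unfold Spec_formula_2; infer_instance

-- ===== CLAIM (what is proved, stated in full; the proofs are below) =====
def Claim_equal_formula_2 : Prop := ∀ (lin : Int) (col : Int), Dom_formula_2 lin col → Spec_formula_2 lin col (formula_2 lin col)

-- ===== LEMMAS AND PROOFS =====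
theorem foldl_append_map {α β : Type} (f : α → β) (l : List α) (init : List β) :
    l.foldl (fun acc x => acc ++ [f x]) init = init ++ l.map f := by
  induction l generalizing init with
  | nil => simp
  | cons x xs ih => simp [List.foldl, ih]

-- B's divmod recovers the row/column pair from the flat index
theorem flat_cell (r t : Nat) (m : Int) (ht : (t : Int) < m) :
    (PySem.Int.floordiv ((r : Int) * m + t) m = r) ∧ (PySem.Int.mod ((r : Int) * m + t) m = t) := by
  have hm : 0 < m := by omega
  constructor
  · rw [PySem.Int.floordiv_eq_iff_of_pos hm]
    constructor <;> nlinarith [Int.natCast_nonneg t, Int.natCast_nonneg r]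
  · rw [PySem.Int.mod_eq_emod_of_pos hm]
    rw [add_comm ((r : Int) * m) (t : Int), mul_comm (r : Int) m,
      Int.add_mul_emod_self_left, Int.emod_eq_of_lt (by positivity) ht]

-- one row of B: the slice of the flat list equals A's row
theorem row_eq (col n m : Int) (r : Nat) (hr : (r : Int) < n)
    (hm0 : 0 ≤ m) (hcm : (col + 1 - 1).toNat = m.toNat) :
    PySem.List.slice
      ((PySem.List.pyRange 0 (n * m) 1).map (fun k =>
        if PySem.Int.floordiv k m = PySem.Int.mod k m then
          2 * (PySem.Int.floordiv k m + 1) - 3 * (PySem.Int.mod k m + 1)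
        else
          4 * (PySem.Int.floordiv k m + 1) + 5 * (PySem.Int.mod k m + 1)))
      (some ((r : Int) * m)) (some (((r : Int) + 1) * m))
    = (PySem.List.pyRange 1 (col + 1) 1).map (fun j =>
        if (1 : Int) + r = j then 2 * (1 + (r : Int)) - 3 * j else 4 * (1 + (r : Int)) + 5 * j) := by
  have hcast1 : (r : Int) * m = ((r * m.toNat : Nat) : Int) := by
    push_cast; rw [Int.toNat_of_nonneg hm0]
  have hcast2 : ((r : Int) + 1) * m = ((r * m.toNat : Nat) : Int) + ((m.toNat : Nat) : Int) := by
    push_cast; rw [Int.toNat_of_nonneg hm0]; ring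
  have hNM : n * m = ((n.toNat * m.toNat : Nat) : Int) := by
    push_cast; rw [Int.toNat_of_nonneg (by omega), Int.toNat_of_nonneg hm0]
  rw [hcast1, hcast2, PySem.List.slice_natCast_add]
  apply List.ext_getElem
  · simp only [List.length_take, List.length_drop, List.length_map,
      PySem.List.length_pyRange_one, hcm, hNM, Int.sub_zero, Int.toNat_natCast]
    have hrn : r + 1 ≤ n.toNat := by omega
    have : r * m.toNat + m.toNat ≤ n.toNat * m.toNat := by
      calc r * m.toNat + m.toNat = (r + 1) * m.toNat := by ring
        _ ≤ n.toNat * m.toNat := Nat.mul_le_mul_right _ hrn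
    omega
  · intro t h1 h2
    simp only [List.length_take, List.length_drop, List.length_map,
      PySem.List.length_pyRange_one, hcm] at h1 h2
    have htM : t < m.toNat := by omega
    rw [List.getElem_take, List.getElem_drop, List.getElem_map,
      PySem.List.getElem_pyRange_one, List.getElem_map, PySem.List.getElem_pyRange_one]
    have hk : (0 : Int) + ((r * m.toNat + t : Nat) : Int) = (r : Int) * m + (t : Int) := by
      push_cast; rw [Int.toNat_of_nonneg hm0]; ring
    rw [hk]
    obtain ⟨hdiv, hmod⟩ := flat_cell r t m (by omega)
    rw [hdiv, hmod]
    by_cases hrt : (1 : Int) + r = 1 + t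
    · rw [if_pos (by omega : (r : Int) = t), if_pos hrt]; ring
    · rw [if_neg (by omega : ¬ (r : Int) = (t : Int)), if_neg hrt]; ring

-- ===== VERDICT (by name: the statement is the Claim_ definition above) =====
theorem formula_2_spec : Claim_equal_formula_2 := by
  intro lin col _
  unfold Spec_formula_2 formula_2 formula_2_alt
  simp only [foldl_append_map, List.nil_append]
  apply List.ext_getElem
  · simp [PySem.List.length_pyRange_one]
    split <;> omega
  · intro r hr1 hr2
    simp only [List.length_map, PySem.List.length_pyRange_one] at hr1 hr2
    rw [List.getElem_map, List.getElem_map, PySem.List.getElem_pyRange_one,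
      PySem.List.getElem_pyRange_one]
    have hrn : (r : Int) < (if lin > 0 then lin else 0) := by
      split at hr2 <;> omega
    have := row_eq col (if lin > 0 then lin else 0) (if col > 0 then col else 0) r hrn
      (by split <;> omega) (by split <;> omega)
    simp only [zero_add]
    rw [this]
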